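-- pv_equiv track=rewrite | github.com/alexismarret/postProcess | parallelFunctions.py | distrib_task
-- ===== SOURCE A (Python) =====
-- def distrib_task(begin, end, division) :
--
--     #job distribution
--     size   = end - begin + 1    #total number of indexes
--     segm   = size // division   #number of iteration to perform per division
--     remain = size % division    #remaining indexes to calculate after division
--
--     #handles case if less time elements than division
--     if segm == 0: division = remain
--
--     #initialization
--     lower = begin
--     jobs = [[None]*2 for _ in range(division)]
--
--     #loop over divisions
--     for i in range(division):
--
--         #distribute indexes into the divisions, accounting for remaining loops
--         if remain > 0:
--             upper = lower + segm       #upper index, added +1 if additional index to process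
--             remain -= 1                #keep track of the remaining loops to distribute
--         else:
--             upper = lower + segm - 1   #upper index if no additional index to process
--
--         jobs[i][0] = lower
--         jobs[i][1] = upper + 1
--
--         lower = upper + 1              #next pair lower index
--
--         #next division
--
--     return jobs
-- ===== SOURCE B (Python) =====
-- def distrib_task(begin, end, division):
--     size = end - begin + 1
--     segm = size // division
--     remain = size % division
--     if segm == 0:
--         division = remain
--     return [[begin + i * segm + min(i, remain),
--              begin + (i + 1) * segm + min(i + 1, remain)]
--             for i in range(division)]
-- ===== Notes on version B (the rewrite author's own statement) =====
-- stated objective: simpler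
-- what changed: B replaces A's stateful loop with running lower/remain accumulators and a preallocated mutated jobs list by a single comprehension computing each pair in closed form: start_i = begin + i*segm + min(i, remain), end_i = begin + (i+1)*segm + min(i+1, remain).
-- outside the precondition, e.g. on distrib_task(0, 9, 0): A raises ZeroDivisionError, B raises ZeroDivisionError
import Mathlib
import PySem

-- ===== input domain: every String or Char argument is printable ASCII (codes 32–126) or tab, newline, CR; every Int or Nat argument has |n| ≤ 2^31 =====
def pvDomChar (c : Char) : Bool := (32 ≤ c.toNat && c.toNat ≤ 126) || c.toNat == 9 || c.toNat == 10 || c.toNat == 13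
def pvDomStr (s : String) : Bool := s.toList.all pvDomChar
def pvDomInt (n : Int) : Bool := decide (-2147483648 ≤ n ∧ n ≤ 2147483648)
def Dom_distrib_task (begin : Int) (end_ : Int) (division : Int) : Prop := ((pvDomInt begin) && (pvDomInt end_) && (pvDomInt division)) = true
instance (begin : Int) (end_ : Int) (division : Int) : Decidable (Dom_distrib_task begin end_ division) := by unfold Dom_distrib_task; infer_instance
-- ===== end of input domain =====

-- B replaces A's running lower/remain accumulators by a closed-form per-index formula (objective: simpler).

-- ===== PORT A =====
-- loop body of A: state = (remain, lower, jobs); jobs[i][0] = lower, jobs[i][1] = upper+1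
-- (i comes from range(division), so it is a nonnegative in-range index: List.set is exact here)
def distribStepA (segm : Int) (st : Int × Int × List (List Int)) (i : Int) :
    Int × Int × List (List Int) :=
  let remain := st.1
  let lower := st.2.1
  let jobs := st.2.2
  let p := if remain > 0 then (lower + segm, remain - 1) else (lower + segm - 1, remain)
  (p.2, p.1 + 1, jobs.set i.toNat [lower, p.1 + 1])

def distrib_task (begin : Int) (end_ : Int) (division : Int) : List (List Int) :=
  let size := end_ - begin + 1
  let segm := PySem.Int.floordiv size division
  let remain := PySem.Int.mod size division
  let division := if segm = 0 then remain else division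
  -- jobs = [[None]*2 for _ in range(division)]: placeholder [0, 0]; every entry is overwritten
  let jobs := List.replicate division.toNat ([0, 0] : List Int)
  let res := (PySem.List.pyRange 0 division 1).foldl (distribStepA segm) (remain, begin, jobs)
  res.2.2

-- ===== PORT B =====
def distrib_task_alt (begin : Int) (end_ : Int) (division : Int) : List (List Int) :=
  let size := end_ - begin + 1
  let segm := PySem.Int.floordiv size division
  let remain := PySem.Int.mod size division
  let division := if segm = 0 then remain else division
  (PySem.List.pyRange 0 division 1).map (fun i =>
    [begin + i * segm + min i remain, begin + (i + 1) * segm + min (i + 1) remain])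

-- ===== PRECONDITION & SPEC =====
-- Pre_ excludes division = 0, where Python A raises ZeroDivisionError.
def Pre_distrib_task (begin : Int) (end_ : Int) (division : Int) : Prop := division ≠ 0
instance (begin : Int) (end_ : Int) (division : Int) : Decidable (Pre_distrib_task begin end_ division) := by unfold Pre_distrib_task; infer_instance
def pvWitness_distrib_task : Int × Int × Int := (0, 9, 3)

def Spec_distrib_task (begin : Int) (end_ : Int) (division : Int) (out : List (List Int)) : Prop := out = distrib_task_alt begin end_ division
instance (begin : Int) (end_ : Int) (division : Int) (out : List (List Int)) : Decidable (Spec_distrib_task begin end_ division out) := by unfold Spec_distrib_task; infer_instance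

-- ===== CLAIM (what is proved, stated in full; the proofs are below) =====
def Claim_equal_distrib_task : Prop := ∀ (begin : Int) (end_ : Int) (division : Int), Dom_distrib_task begin end_ division → Pre_distrib_task begin end_ division → Spec_distrib_task begin end_ division (distrib_task begin end_ division)

-- ===== LEMMAS AND PROOFS =====

-- target value of entry k, as B computes it
def distribTgt (segm r0 b : Int) (k : Nat) : List Int :=
  [b + (k : Int) * segm + min (k : Int) r0, b + ((k : Int) + 1) * segm + min ((k : Int) + 1) r0]

-- loop invariant of A's fold, for any prefix length n ≤ N of the index range
lemma distrib_fold_inv (segm r0 b : Int) (hr : 0 ≤ r0) (N : Nat) (n : Nat) (hn : n ≤ N) :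
    ((List.range n).map (fun (k : Nat) => (k : Int))).foldl (distribStepA segm)
      (r0, b, List.replicate N ([0, 0] : List Int))
    = (r0 - min (n : Int) r0, b + (n : Int) * segm + min (n : Int) r0,
       (List.range n).map (distribTgt segm r0 b) ++ List.replicate (N - n) ([0, 0] : List Int)) := by
  induction n with
  | zero => simp; omega
  | succ m ih =>
    have hm : m ≤ N := Nat.le_of_succ_le hn
    rw [List.range_succ, List.map_append, List.foldl_append, ih hm]
    simp only [List.map_cons, List.map_nil, List.foldl_cons, List.foldl_nil, distribStepA]
    have hset : ((List.range m).map (distribTgt segm r0 b)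
        ++ List.replicate (N - m) ([0, 0] : List Int)).set ((m : Int)).toNat
          (distribTgt segm r0 b m)
        = (List.range (m + 1)).map (distribTgt segm r0 b)
          ++ List.replicate (N - (m + 1)) ([0, 0] : List Int) := by
      have hlen : ((List.range m).map (distribTgt segm r0 b)).length = m := by simp
      have hrep : N - m = (N - (m + 1)) + 1 := by omega
      rw [Int.toNat_natCast, List.set_append_right _ _ (by omega), hlen, Nat.sub_self,
        hrep, List.replicate_succ, List.set_cons_zero, List.range_succ, List.map_append]
      simp
    by_cases hcase : (m : Int) < r0
    · have h1 : min (m : Int) r0 = m := by omega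
      have h2 : min ((m : Int) + 1) r0 = (m : Int) + 1 := by omega
      simp only [show r0 - min (m : Int) r0 > 0 from by omega, if_pos]
      refine Prod.ext (by push_cast; omega) (Prod.ext (by push_cast [h1, h2]; ring) ?_)
      simp only []
      have hval : [b + (m : Int) * segm + min (m : Int) r0,
          b + (m : Int) * segm + min (m : Int) r0 + segm + 1] = distribTgt segm r0 b m := by
        simp [distribTgt, h1, h2]; ring
      rw [hval, ← List.range_succ, hset]
    · have h1 : min (m : Int) r0 = r0 := by omega
      have h2 : min ((m : Int) + 1) r0 = r0 := by omega
      have hnp : ¬ (r0 - min (m : Int) r0 > 0) := by omega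
      simp only [hnp, if_neg, not_false_iff]
      refine Prod.ext (by push_cast; omega) (Prod.ext (by push_cast [h1, h2]; ring) ?_)
      simp only []
      have hval : [b + (m : Int) * segm + min (m : Int) r0,
          b + (m : Int) * segm + min (m : Int) r0 + segm - 1 + 1] = distribTgt segm r0 b m := by
        simp [distribTgt, h1, h2]; ring
      rw [hval, ← List.range_succ, hset]

theorem distrib_task_spec : Claim_equal_distrib_task := by
  intro b e d _ hpre
  unfold Spec_distrib_task distrib_task distrib_task_alt
  simp only []
  set segm := PySem.Int.floordiv (e - b + 1) d with hsegm
  set r0 := PySem.Int.mod (e - b + 1) d with hr0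
  set D : Int := if segm = 0 then r0 else d with hD
  by_cases hDpos : 0 < D
  · -- the loop runs; then necessarily d > 0 and 0 ≤ r0
    have hr : 0 ≤ r0 := by
      rcases lt_or_gt_of_ne hpre with hneg | hpos
      · exfalso
        have hb := PySem.Int.mod_neg_bounds (e - b + 1) hneg
        rw [← hr0] at hb
        by_cases hs : segm = 0
        · rw [hD, if_pos hs] at hDpos; omega
        · rw [hD, if_neg hs] at hDpos; omega
      · have := PySem.Int.mod_nonneg (e - b + 1) hpos
        rw [← hr0] at this; exact this
    rw [PySem.List.pyRange_one 0 D]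
    simp only [sub_zero, zero_add]
    rw [distrib_fold_inv segm r0 b hr D.toNat D.toNat (le_refl _)]
    simp [distribTgt]
  · -- D ≤ 0: empty range on both sides
    have hDle : D ≤ 0 := by exact not_lt.mp hDpos
    have hnil : PySem.List.pyRange 0 D 1 = [] := PySem.List.pyRange_one_eq_nil hDle
    simp [hnil]
    exact hDle
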